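-- pv_equiv track=rewrite | github.com/alexander-belikov/article_analysis | article_analysis/parse.py | split_into_phrases
-- ===== SOURCE A (Python) =====
-- def split_into_phrases(tokens_list):
--     phrases = []
--     cur_phrase = []
--     for token1, token2 in zip(tokens_list[:-1], tokens_list[1:]):
--         cur_phrase.append(token1)
--         if token1 == '.' and token2[0].isupper():
--             phrases.append(cur_phrase)
--             cur_phrase = []
--     cur_phrase.append(tokens_list[-1])
--     phrases.append(cur_phrase)
--     return phrases
-- ===== SOURCE B (Python) =====
-- def split_into_phrases(tokens_list):
--     cuts = [i for i in range(len(tokens_list) - 1)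
--             if tokens_list[i] == '.' and tokens_list[i + 1][0].isupper()]
--     phrases = []
--     start = 0
--     for i in cuts:
--         phrases.append(tokens_list[start:i + 1])
--         start = i + 1
--     phrases.append(tokens_list[start:])
--     return phrases
-- ===== Notes on version B (the rewrite author's own statement) =====
-- stated objective: alternative
-- what changed: Replaces the interleaved scan-and-accumulate over adjacent pairs by a two-pass decomposition: first collect all cut indices (token '.' followed by an uppercase-initial token), then slice the list at those indices.
import Mathlib
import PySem

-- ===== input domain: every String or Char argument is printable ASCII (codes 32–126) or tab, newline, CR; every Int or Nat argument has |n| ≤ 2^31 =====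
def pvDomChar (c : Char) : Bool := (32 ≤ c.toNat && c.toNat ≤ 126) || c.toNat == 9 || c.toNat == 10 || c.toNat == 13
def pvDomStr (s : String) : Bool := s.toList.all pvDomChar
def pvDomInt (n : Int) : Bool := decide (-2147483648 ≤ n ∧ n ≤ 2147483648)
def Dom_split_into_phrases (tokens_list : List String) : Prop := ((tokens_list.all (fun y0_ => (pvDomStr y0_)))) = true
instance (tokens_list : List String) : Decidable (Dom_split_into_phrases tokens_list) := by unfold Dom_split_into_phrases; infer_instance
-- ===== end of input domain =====

-- B replaces A's interleaved scan-and-accumulate by a two-pass decomposition (collect cut indices, then slice); same cost, different structure.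


-- ===== PORT A =====
-- token2[0].isupper(): first char uppercase; the empty-string case ([] branch) is where
-- Python raises IndexError — those inputs are excluded by Pre_split_into_phrases.
def pyFirstUpper (s : String) : Bool :=
  match s.toList with
  | [] => false
  | c :: _ => PySem.Chars.isupper c

-- the loop body of A
def stepA (st : List (List String) × List String) (p : String × String) :
    List (List String) × List String :=
  let cur := st.2 ++ [p.1]
  if p.1 == "." && pyFirstUpper p.2 then (st.1 ++ [cur], []) else (st.1, cur)

def split_into_phrases (tokens_list : List String) : List (List String) :=
  -- zip(tokens_list[:-1], tokens_list[1:])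
  let st := ((PySem.List.slice tokens_list none (some (-1))).zip
             (PySem.List.slice tokens_list (some 1) none)).foldl stepA ([], [])
  match PySem.List.pyGet? tokens_list (-1) with
  | none => []   -- IndexError on empty input (outside Pre_)
  | some last => st.1 ++ [st.2 ++ [last]]

-- ===== PORT B =====
-- the cut-index comprehension of B (indices are in range, so getD is exact for tokens_list[i])
def cutsB (tokens_list : List String) : List Nat :=
  (List.range (tokens_list.length - 1)).filter
    (fun i => tokens_list.getD i "" == "." && pyFirstUpper (tokens_list.getD (i + 1) ""))

-- the loop body of B; tokens_list[start:i+1] with 0 ≤ start, i+1 is exactly drop/take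
def stepB (tokens_list : List String) (st : List (List String) × Nat) (i : Nat) :
    List (List String) × Nat :=
  (st.1 ++ [(tokens_list.drop st.2).take (i + 1 - st.2)], i + 1)

def split_into_phrases_alt (tokens_list : List String) : List (List String) :=
  let st := (cutsB tokens_list).foldl (stepB tokens_list) ([], 0)
  st.1 ++ [tokens_list.drop st.2]

-- ===== PRECONDITION & SPEC =====
-- Pre_ excludes exactly the inputs where Python A raises: the empty list (IndexError on
-- tokens_list[-1]) and lists where a '.' is immediately followed by an empty token
-- (IndexError on token2[0]).
def Pre_split_into_phrases (tokens_list : List String) : Prop :=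
  tokens_list ≠ [] ∧
  ((List.range (tokens_list.length - 1)).all
    (fun i => !(tokens_list.getD i "" == "." && tokens_list.getD (i + 1) "" == ""))) = true

instance (tokens_list : List String) : Decidable (Pre_split_into_phrases tokens_list) := by
  unfold Pre_split_into_phrases; infer_instance

def pvWitness_split_into_phrases : List String := ["Hi", ".", "Ok", "then"]

def Spec_split_into_phrases (tokens_list : List String) (out : List (List String)) : Prop :=
  out = split_into_phrases_alt tokens_list
instance (tokens_list : List String) (out : List (List String)) :
    Decidable (Spec_split_into_phrases tokens_list out) := by
  unfold Spec_split_into_phrases; infer_instance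

-- ===== CLAIM (what is proved, stated in full; the proofs are below) =====
def Claim_equal_split_into_phrases : Prop :=
  ∀ (tokens_list : List String), Dom_split_into_phrases tokens_list →
    Pre_split_into_phrases tokens_list →
    Spec_split_into_phrases tokens_list (split_into_phrases tokens_list)

-- ===== LEMMAS AND PROOFS =====

-- prepend x to the head phrase (the common recurrence shape of both ports)
def consHead (x : String) : List (List String) → List (List String)
  | [] => [[x]]
  | h :: t => (x :: h) :: t

def cutCond (x y : String) : Bool := x == "." && pyFirstUpper y

-- A's fold only appends to the phrase list
theorem foldA_extract (ps : List (String × String)) :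
    ∀ (ph : List (List String)) (cur : List String),
      List.foldl stepA (ph, cur) ps =
        (ph ++ (List.foldl stepA ([], cur) ps).1, (List.foldl stepA ([], cur) ps).2) := by
  induction ps with
  | nil => intro ph cur; simp
  | cons p ps ih =>
    intro ph cur
    simp only [List.foldl_cons, stepA, List.nil_append]
    by_cases h : (p.1 == "." && pyFirstUpper p.2) = true
    · simp only [h, if_pos]
      rw [ih (ph ++ [cur ++ [p.1]]) [], ih [cur ++ [p.1]] []]
      simp
    · simp only [h, Bool.false_eq_true, if_false]
      exact ih ph (cur ++ [p.1])

-- a pending x at the front of the current phrase ends up at the front of the next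
-- completed phrase (or of the final current phrase)
theorem foldA_consHead (ps : List (String × String)) :
    ∀ (x : String) (cur : List String),
      List.foldl stepA ([], x :: cur) ps =
        (match List.foldl stepA ([], cur) ps with
         | ([], b) => ([], x :: b)
         | (h :: t, b) => ((x :: h) :: t, b)) := by
  induction ps with
  | nil => intro x cur; simp
  | cons p ps ih =>
    intro x cur
    simp only [List.foldl_cons, stepA, List.nil_append, List.cons_append]
    by_cases h : (p.1 == "." && pyFirstUpper p.2) = true
    · simp only [h, if_pos]
      rw [foldA_extract ps [x :: (cur ++ [p.1])] [], foldA_extract ps [cur ++ [p.1]] []]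
      rcases hF : (List.foldl stepA ([], []) ps) with ⟨a, b⟩
      cases a <;> simp
    · simp only [h, Bool.false_eq_true, if_false]
      exact ih x (cur ++ [p.1])

theorem A_singleton (x : String) : split_into_phrases [x] = [[x]] := by
  simp [split_into_phrases, PySem.List.slice_to_neg_one, PySem.List.slice_from_one,
        PySem.List.pyGet?_neg_one]

theorem A_cons (x : String) (l : List String) (hl : l ≠ []) :
    split_into_phrases (x :: l) =
      if cutCond x (l.getD 0 "") then [x] :: split_into_phrases l
      else consHead x (split_into_phrases l) := by
  obtain ⟨y, r, rfl⟩ := List.exists_cons_of_ne_nil hl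
  simp only [split_into_phrases, PySem.List.slice_to_neg_one, PySem.List.slice_from_one,
             PySem.List.pyGet?_neg_one]
  have hlast : (x :: y :: r).getLast? = (y :: r).getLast? := List.getLast?_cons_cons
  rw [hlast]
  have hdl : (x :: y :: r).dropLast = x :: (y :: r).dropLast := by
    simp [List.dropLast_cons_of_ne_nil]
  rw [hdl]
  cases hlast2 : (y :: r).getLast? with
  | none => simp at hlast2
  | some last =>
    simp only [List.tail_cons]
    have hzip : (x :: (y :: r).dropLast).zip (y :: r) =
        (x, y) :: ((y :: r).dropLast.zip r) := by
      cases r <;> simp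
    rw [hzip]
    simp only [List.foldl_cons, stepA, List.nil_append, List.getD_cons_zero, cutCond]
    by_cases hc : (x == "." && pyFirstUpper y) = true
    · simp only [hc, if_pos]
      rw [foldA_extract ((y :: r).dropLast.zip r) [[x]] []]
      simp
    · simp only [hc, Bool.false_eq_true, if_false]
      rw [foldA_consHead ((y :: r).dropLast.zip r) x []]
      rcases hF : List.foldl stepA ([], []) ((y :: r).dropLast.zip r) with ⟨a, b⟩
      cases a <;> simp [consHead]

theorem B_singleton (x : String) : split_into_phrases_alt [x] = [[x]] := by
  simp [split_into_phrases_alt, cutsB]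

theorem cutsB_cons (x : String) (l : List String) (hl : l ≠ []) :
    cutsB (x :: l) =
      (if cutCond x (l.getD 0 "") then [0] else []) ++ (cutsB l).map (· + 1) := by
  obtain ⟨y, r, rfl⟩ := List.exists_cons_of_ne_nil hl
  simp only [cutsB, List.length_cons, Nat.add_sub_cancel, List.range_succ_eq_map,
             List.filter_cons, List.filter_map, cutCond]
  simp only [List.getD_cons_succ, List.getD_cons_zero, Function.comp_def, Nat.succ_eq_add_one]
  split_ifs <;> simp

theorem foldB_shift (x : String) (l : List String) (cs : List Nat) :
    ∀ (ph : List (List String)) (s : Nat),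
      List.foldl (stepB (x :: l)) (ph, s + 1) (cs.map (· + 1)) =
        ((List.foldl (stepB l) (ph, s) cs).1, (List.foldl (stepB l) (ph, s) cs).2 + 1) := by
  induction cs with
  | nil => intro ph s; simp
  | cons j cs ih =>
    intro ph s
    simp only [List.map_cons, List.foldl_cons, stepB]
    have h1 : (x :: l).drop (s + 1) = l.drop s := by simp
    have h2 : j + 1 + 1 - (s + 1) = j + 1 - s := by omega
    rw [h1, h2, ih]

theorem foldB_extract (tl : List String) (cs : List Nat) :
    ∀ (ph : List (List String)) (s : Nat),
      List.foldl (stepB tl) (ph, s) cs =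
        (ph ++ (List.foldl (stepB tl) ([], s) cs).1, (List.foldl (stepB tl) ([], s) cs).2) := by
  induction cs with
  | nil => intro ph s; simp
  | cons j cs ih =>
    intro ph s
    simp only [List.foldl_cons, stepB, List.nil_append]
    rw [ih (ph ++ [(tl.drop s).take (j + 1 - s)]) (j + 1), ih [(tl.drop s).take (j + 1 - s)] (j + 1)]
    simp

theorem B_cons (x : String) (l : List String) (hl : l ≠ []) :
    split_into_phrases_alt (x :: l) =
      if cutCond x (l.getD 0 "") then [x] :: split_into_phrases_alt l
      else consHead x (split_into_phrases_alt l) := by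
  simp only [split_into_phrases_alt]
  rw [cutsB_cons x l hl]
  by_cases hc : cutCond x (l.getD 0 "") = true
  · simp only [hc, if_pos, List.singleton_append, List.foldl_cons, stepB, List.nil_append,
               List.drop_zero]
    have h1 : (x :: l).take (0 + 1 - 0) = [x] := by simp
    rw [h1, foldB_shift x l (cutsB l) [[x]] 0, foldB_extract l (cutsB l) [[x]] 0]
    simp
  · simp only [hc, Bool.false_eq_true, if_false, List.nil_append]
    cases hcuts : cutsB l with
    | nil => simp [consHead]
    | cons j cs =>
      simp only [List.map_cons, List.foldl_cons, stepB, List.nil_append, List.drop_zero]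
      have h1 : (x :: l).take (j + 1 + 1 - 0) = x :: l.take (j + 1) := by simp
      have h2 : l.take (j + 1 - 0) = l.take (j + 1) := by simp
      rw [h1, h2, foldB_shift x l cs [x :: l.take (j + 1)] (j + 1),
          foldB_extract l cs [x :: l.take (j + 1)] (j + 1),
          foldB_extract l cs [l.take (j + 1)] (j + 1)]
      rcases hG : List.foldl (stepB l) ([], j + 1) cs with ⟨a, b⟩
      simp [consHead]

theorem main_eq (l : List String) (hl : l ≠ []) :
    split_into_phrases l = split_into_phrases_alt l := by
  induction l with
  | nil => exact absurd rfl hl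
  | cons x l ih =>
    rcases eq_or_ne l [] with rfl | hne
    · rw [A_singleton, B_singleton]
    · rw [A_cons x l hne, B_cons x l hne, ih hne]

-- ===== VERDICT (by name: the statement is the Claim_ definition above) =====
theorem split_into_phrases_spec : Claim_equal_split_into_phrases := by
  intro l _ hpre
  unfold Spec_split_into_phrases
  exact main_eq l hpre.1
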